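-- pv_equiv track=rewrite | github.com/nordicolympiad/baltic-olympiad-2017 | practice/pongtournament/submissions/accepted/torstein.py | findRank
-- ===== SOURCE A (Python) =====
-- def findRank(graph, rank, prop, criteria):
--     # Return False if no rank was possible. Otherwise, found rank is
--     # stored in rank
--     data = []
--     for i in range(len(graph)):
--         if prop[i] != criteria: continue
--         wins = 0
--         for j in range(len(graph)):
--             if prop[j] != criteria: continue
--             wins += graph[i][j]
--         data.append((wins, i))
--
--     data.sort(key=lambda x: -x[0])
--
--     if len(data) == 0:
--         return True
--     if data[0][0] != len(data) - 1:
--         return False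
--
--     rank[data[0][1]] = 0
--
--     prevwins = len(data) - 1
--     for prevrank, (wins, i) in enumerate(data[1:]):
--         if wins != prevwins - 1:
--             return False
--         prevwins = wins
--         rank[i] = prevrank + 1
--
--     return True
-- ===== SOURCE B (Python) =====
-- def findRank(graph, rank, prop, criteria):
--     # Return-value-equivalent reimplementation: instead of sorting the
--     # (wins, i) pairs and scanning for consecutive win counts, check that
--     # the win counts of the matching nodes are exactly a permutation of
--     # 0..k-1 (distinct and in range), then place rank[i] = k-1 - wins[i]
--     # directly.  Writes rank only after validation succeeds (A leaves
--     # partial sort-ordered writes on failure); return value is identical.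
--     idx = [i for i in range(len(graph)) if prop[i] == criteria]
--     k = len(idx)
--     wins = [sum(graph[i][j] for j in idx) for i in idx]
--     if len(set(wins)) != k or any(w < 0 or w >= k for w in wins):
--         return False
--     for i, w in zip(idx, wins):
--         rank[i] = k - 1 - w
--     return True
-- ===== Notes on version B (the rewrite author's own statement) =====
-- stated objective: alternative
-- what changed: A sorts the (wins, index) pairs descending and scans for consecutive win counts k-1, k-2, ..., 0; B never sorts: it checks directly that the win counts are k distinct values in [0, k) (a permutation of 0..k-1) and then places rank[i] = k-1 - wins[i]; note B writes rank only after validation, so on failing inputs the partial rank contents differ (return value is identical).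
-- outside the precondition, e.g. on findRank([[0, 0], [0, 0]], [], [0, 0], 0): A returns False, B returns False
import Mathlib
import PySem

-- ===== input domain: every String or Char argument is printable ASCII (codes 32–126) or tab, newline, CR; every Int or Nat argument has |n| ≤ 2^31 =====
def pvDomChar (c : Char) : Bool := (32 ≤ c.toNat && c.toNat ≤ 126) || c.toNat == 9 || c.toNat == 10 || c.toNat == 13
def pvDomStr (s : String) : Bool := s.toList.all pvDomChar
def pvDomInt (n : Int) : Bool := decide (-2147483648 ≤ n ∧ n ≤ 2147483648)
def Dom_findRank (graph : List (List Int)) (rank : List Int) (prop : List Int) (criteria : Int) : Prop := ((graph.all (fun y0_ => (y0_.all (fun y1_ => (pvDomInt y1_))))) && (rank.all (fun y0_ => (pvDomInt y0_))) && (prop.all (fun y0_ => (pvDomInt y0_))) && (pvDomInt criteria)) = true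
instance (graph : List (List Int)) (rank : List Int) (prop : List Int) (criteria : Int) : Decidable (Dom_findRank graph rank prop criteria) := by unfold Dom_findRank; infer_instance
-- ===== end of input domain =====

-- B replaces A's sort-then-consecutive-scan over the (wins, i) pairs by a
-- direct check that the win counts are a permutation of 0..k-1 (distinct and
-- in range); same return value on Pre_. Both Pythons mutate `rank` in place;
-- only the RETURN value is modelled and proved here (on failing inputs A
-- leaves partial writes in `rank`, B writes `rank` only after validating).

-- ===== PORT A =====
-- the `for prevrank, (wins, i) in enumerate(data[1:])` loop; the in-place
-- writes `rank[...] = ...` are invisible in the returned Bool and are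
-- therefore not threaded through.
def findRankLoopA : List (Int × Int) → Int → Bool
  | [], _ => true
  | (wins, _i) :: rest, prevwins =>
    if wins ≠ prevwins - 1 then false else findRankLoopA rest wins

def findRank (graph : List (List Int)) (rank : List Int) (prop : List Int) (criteria : Int) : Bool :=
  let data : List (Int × Int) :=
    (PySem.List.pyRange 0 (graph.length : Int) 1).foldl (fun acc i =>
      if PySem.List.pyGetD prop i 0 ≠ criteria then acc
      else
        acc ++ [((PySem.List.pyRange 0 (graph.length : Int) 1).foldl (fun w j =>
          if PySem.List.pyGetD prop j 0 ≠ criteria then w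
          else w + PySem.List.pyGetD (PySem.List.pyGetD graph i []) j 0) 0, i)]) []
  match PySem.List.sorted data (fun x => -x.1) false with
  | [] => true
  | (w0, i0) :: rest =>
    if w0 ≠ (((w0, i0) :: rest).length : Int) - 1 then false
    else findRankLoopA rest ((((w0, i0) :: rest).length : Int) - 1)

-- ===== PORT B =====
def findRank_alt (graph : List (List Int)) (rank : List Int) (prop : List Int) (criteria : Int) : Bool :=
  let idx := (PySem.List.pyRange 0 (graph.length : Int) 1).filter
      (fun i => PySem.List.pyGetD prop i 0 == criteria)
  let k : Int := idx.length
  let wins := idx.map (fun i =>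
      idx.foldl (fun w j => w + PySem.List.pyGetD (PySem.List.pyGetD graph i []) j 0) 0)
  if ((PySem.Set.ofList wins).length : Int) != k
      || wins.any (fun w => decide (w < 0) || decide (w ≥ k)) then false
  else true

-- ===== PRECONDITION & SPEC =====
-- Pre_ excludes the inputs where A raises IndexError: prop shorter than graph,
-- a matching row too short for a matching column, or a matching index out of
-- range of `rank`. The rank-length bound is a slight over-approximation: it
-- also excludes some inputs on which A returns False before reaching the
-- out-of-range rank write (B returns False there too).
def Pre_findRank (graph : List (List Int)) (rank : List Int) (prop : List Int) (criteria : Int) : Prop :=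
  graph.length ≤ prop.length ∧
  ∀ i ∈ List.range graph.length, prop.getD i 0 = criteria →
    i < rank.length ∧
    ∀ j ∈ List.range graph.length, prop.getD j 0 = criteria → j < (graph.getD i []).length
instance (graph : List (List Int)) (rank : List Int) (prop : List Int) (criteria : Int) : Decidable (Pre_findRank graph rank prop criteria) := by unfold Pre_findRank; infer_instance

def pvWitness_findRank : List (List Int) × List Int × List Int × Int :=
  ([[0, 1], [0, 0]], [0, 0], [0, 0], 0)

def Spec_findRank (graph : List (List Int)) (rank : List Int) (prop : List Int) (criteria : Int) (out : Bool) : Prop := out = findRank_alt graph rank prop criteria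
instance (graph : List (List Int)) (rank : List Int) (prop : List Int) (criteria : Int) (out : Bool) : Decidable (Spec_findRank graph rank prop criteria out) := by unfold Spec_findRank; infer_instance

-- ===== CLAIM (what is proved, stated in full; the proofs are below) =====
def Claim_equal_findRank : Prop := ∀ (graph : List (List Int)) (rank : List Int) (prop : List Int) (criteria : Int), Dom_findRank graph rank prop criteria → Pre_findRank graph rank prop criteria → Spec_findRank graph rank prop criteria (findRank graph rank prop criteria)

-- ===== LEMMAS AND PROOFS =====

-- the filtered index list, per-index win count, and win-count list shared by
-- both ports (proof-only normal forms)
def pvIdx (graph : List (List Int)) (prop : List Int) (criteria : Int) : List Int :=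
  (PySem.List.pyRange 0 (graph.length : Int) 1).filter
    (fun i => PySem.List.pyGetD prop i 0 == criteria)

def pvW (graph : List (List Int)) (prop : List Int) (criteria : Int) (i : Int) : Int :=
  (pvIdx graph prop criteria).foldl
    (fun w j => w + PySem.List.pyGetD (PySem.List.pyGetD graph i []) j 0) 0

def pvWins (graph : List (List Int)) (prop : List Int) (criteria : Int) : List Int :=
  (pvIdx graph prop criteria).map (pvW graph prop criteria)

-- [s-1, s-2, ..., s-m]
def chainFrom : Int → Nat → List Int
  | _, 0 => []
  | s, m + 1 => (s - 1) :: chainFrom (s - 1) m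

theorem mem_chainFrom (m : Nat) (s w : Int) : w ∈ chainFrom s m ↔ s - m ≤ w ∧ w < s := by
  induction m generalizing s with
  | zero =>
    simp only [chainFrom, List.not_mem_nil, false_iff, not_and, not_lt, Nat.cast_zero]
    omega
  | succ m ih =>
    simp only [chainFrom, List.mem_cons, ih]
    push_cast
    omega

theorem pairwise_gt_chainFrom (m : Nat) (s : Int) : (chainFrom s m).Pairwise (· > ·) := by
  induction m generalizing s with
  | zero => exact List.Pairwise.nil
  | succ m ih =>
    refine List.Pairwise.cons (fun w hw => ?_) (ih (s - 1))
    have := (mem_chainFrom m (s - 1) w).1 hw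
    omega

-- a strictly decreasing list of nonnegative ints below B has at most B elements
theorem sd_len (l : List Int) (hp : l.Pairwise (· > ·)) (h0 : ∀ w ∈ l, 0 ≤ w)
    (B : Int) (hB : 0 ≤ B) (hlt : ∀ w ∈ l, w < B) : (l.length : Int) ≤ B := by
  induction l generalizing B with
  | nil => simpa using hB
  | cons w t ih =>
    have hpt := List.pairwise_cons.1 hp
    have hle : (t.length : Int) ≤ w :=
      ih hpt.2 (fun x hx => h0 x (List.mem_cons_of_mem _ hx)) w
        (h0 w List.mem_cons_self) (fun x hx => hpt.1 x hx)
    have hwB := hlt w List.mem_cons_self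
    simp only [List.length_cons]
    push_cast
    omega

-- a strictly decreasing list of length k with values in [0, k) is [k-1, ..., 0]
theorem sd_chain (l : List Int) (hp : l.Pairwise (· > ·))
    (hb : ∀ w ∈ l, 0 ≤ w ∧ w < (l.length : Int)) :
    l = chainFrom (l.length : Int) l.length := by
  induction l with
  | nil => rfl
  | cons w t ih =>
    have hpt := List.pairwise_cons.1 hp
    have h0 : ∀ x ∈ t, 0 ≤ x := fun x hx => (hb x (List.mem_cons_of_mem _ hx)).1
    have hle : (t.length : Int) ≤ w :=
      sd_len t hpt.2 h0 w (hb w List.mem_cons_self).1 (fun x hx => hpt.1 x hx)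
    have hlt : w < ((w :: t).length : Int) := (hb w List.mem_cons_self).2
    simp only [List.length_cons] at hlt
    push_cast at hlt
    have hw : w = (t.length : Int) := by omega
    have hbt : ∀ x ∈ t, 0 ≤ x ∧ x < (t.length : Int) := fun x hx =>
      ⟨h0 x hx, by have := hpt.1 x hx; omega⟩
    have ht := ih hpt.2 hbt
    show w :: t = chainFrom ((w :: t).length : Int) (t.length + 1)
    have hlen : (((w :: t).length : Int) - 1) = (t.length : Int) := by
      simp only [List.length_cons]; push_cast; omega
    simp only [chainFrom, hlen]
    exact List.cons_eq_cons.mpr ⟨by omega, ht⟩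

theorem ofList_length_iff (xs : List Int) :
    (PySem.Set.ofList xs).length = xs.length ↔ xs.Nodup := by
  constructor
  · intro h
    have hsub : PySem.Set.ofList xs ⊆ xs := fun x hx => (PySem.Set.mem_ofList _ _).1 hx
    have hsp : List.Subperm (PySem.Set.ofList xs) xs :=
      List.subperm_of_subset (PySem.Set.nodup_ofList xs) hsub
    have hperm : (PySem.Set.ofList xs).Perm xs := hsp.perm_of_length_le (by omega)
    exact hperm.nodup_iff.1 (PySem.Set.nodup_ofList xs)
  · intro h
    rw [PySem.Set.ofList_eq_self_of_nodup xs h]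

-- generic: a fold that skips non-matching elements is a fold over the filter
theorem foldl_filter_if {α β : Type} (q : α → Bool) (h : β → α → β) :
    ∀ (l : List α) (init : β),
      l.foldl (fun b x => if q x then h b x else b) init = (l.filter q).foldl h init := by
  intro l
  induction l with
  | nil => intro init; rfl
  | cons x t ih =>
    intro init
    by_cases hx : q x = true
    · simp [List.foldl_cons, hx, ih]
    · simp [List.foldl_cons, hx, ih]

-- port A's data list in normal form
theorem data_eq (graph : List (List Int)) (prop : List Int) (criteria : Int) :
    (PySem.List.pyRange 0 (graph.length : Int) 1).foldl (fun acc i =>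
      if PySem.List.pyGetD prop i 0 ≠ criteria then acc
      else
        acc ++ [((PySem.List.pyRange 0 (graph.length : Int) 1).foldl (fun w j =>
          if PySem.List.pyGetD prop j 0 ≠ criteria then w
          else w + PySem.List.pyGetD (PySem.List.pyGetD graph i []) j 0) 0, i)]) []
    = (pvIdx graph prop criteria).map (fun i => (pvW graph prop criteria i, i)) := by
  have hfn : (fun (acc : List (Int × Int)) i =>
      if PySem.List.pyGetD prop i 0 ≠ criteria then acc
      else acc ++ [((PySem.List.pyRange 0 (graph.length : Int) 1).foldl (fun w j =>
          if PySem.List.pyGetD prop j 0 ≠ criteria then w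
          else w + PySem.List.pyGetD (PySem.List.pyGetD graph i []) j 0) 0, i)])
      = (fun acc i =>
      if (PySem.List.pyGetD prop i 0 == criteria)
      then acc ++ [((PySem.List.pyRange 0 (graph.length : Int) 1).foldl (fun w j =>
          if (PySem.List.pyGetD prop j 0 == criteria)
          then w + PySem.List.pyGetD (PySem.List.pyGetD graph i []) j 0 else w) 0, i)]
      else acc) := by
    funext acc i
    by_cases h : PySem.List.pyGetD prop i 0 = criteria
    · simp only [h, ne_eq, not_true_eq_false, if_false, beq_self_eq_true, if_true]
      have : (fun (w : Int) (j : Int) =>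
          if PySem.List.pyGetD prop j 0 ≠ criteria then w
          else w + PySem.List.pyGetD (PySem.List.pyGetD graph i []) j 0)
          = (fun w j =>
          if (PySem.List.pyGetD prop j 0 == criteria)
          then w + PySem.List.pyGetD (PySem.List.pyGetD graph i []) j 0 else w) := by
        funext w j
        by_cases hj : PySem.List.pyGetD prop j 0 = criteria <;> simp [hj]
      rw [this]
    · simp [h]
  rw [hfn, foldl_filter_if]
  have hW : ∀ i : Int, (PySem.List.pyRange 0 (graph.length : Int) 1).foldl (fun w j =>
      if (PySem.List.pyGetD prop j 0 == criteria)
      then w + PySem.List.pyGetD (PySem.List.pyGetD graph i []) j 0 else w) 0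
      = pvW graph prop criteria i := by
    intro i
    rw [foldl_filter_if]
    rfl
  simp only [hW]
  exact PySem.List.foldl_append_singleton_eq_map _ _ []

-- the A-side tail loop checks exactly "the firsts are prev-1, prev-2, ..."
theorem loopA_iff (rest : List (Int × Int)) (prev : Int) :
    findRankLoopA rest prev = true ↔ rest.map Prod.fst = chainFrom prev rest.length := by
  induction rest generalizing prev with
  | nil => simp [findRankLoopA, chainFrom]
  | cons p r ih =>
    obtain ⟨w, i⟩ := p
    by_cases hw : w = prev - 1
    · subst hw
      simp [findRankLoopA, chainFrom, ih]
    · simp [findRankLoopA, chainFrom, hw]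

-- A's return value ↔ "the sorted win counts are k-1, k-2, ..., 0"
theorem A_eq (graph : List (List Int)) (rank : List Int) (prop : List Int) (criteria : Int) :
    (findRank graph rank prop criteria = true) ↔
    (PySem.List.sorted ((pvIdx graph prop criteria).map
        (fun i => (pvW graph prop criteria i, i))) (fun x => -x.1) false).map Prod.fst
      = chainFrom ((pvIdx graph prop criteria).length : Int) (pvIdx graph prop criteria).length := by
  have h : findRank graph rank prop criteria =
      (match PySem.List.sorted ((pvIdx graph prop criteria).map
          (fun i => (pvW graph prop criteria i, i))) (fun x => -x.1) false with
      | [] => true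
      | (w0, i0) :: rest =>
        if w0 ≠ (((w0, i0) :: rest).length : Int) - 1 then false
        else findRankLoopA rest ((((w0, i0) :: rest).length : Int) - 1)) := by
    show (match PySem.List.sorted ((PySem.List.pyRange 0 (graph.length : Int) 1).foldl _ [])
        (fun x => -x.1) false with
      | [] => true
      | (w0, i0) :: rest =>
        if w0 ≠ (((w0, i0) :: rest).length : Int) - 1 then false
        else findRankLoopA rest ((((w0, i0) :: rest).length : Int) - 1)) = _
    rw [data_eq]
    rfl
  rw [h]
  have hlen : (PySem.List.sorted ((pvIdx graph prop criteria).map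
      (fun i => (pvW graph prop criteria i, i))) (fun x => -x.1) false).length
      = (pvIdx graph prop criteria).length := by
    rw [PySem.List.length_sorted, List.length_map]
  cases hd : PySem.List.sorted ((pvIdx graph prop criteria).map
      (fun i => (pvW graph prop criteria i, i))) (fun x => -x.1) false with
  | nil =>
    rw [hd] at hlen
    simp [← hlen, chainFrom]
  | cons p rest =>
    obtain ⟨w0, i0⟩ := p
    rw [hd] at hlen
    simp only [List.length_cons] at hlen
    rw [← hlen]
    simp only [List.map_cons]
    have hcast : ((rest.length + 1 : Nat) : Int) - 1 = (rest.length : Int) := by push_cast; omega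
    by_cases hw0 : w0 = (rest.length : Int)
    · subst hw0
      simp only [List.length_cons, hcast, ne_eq, not_true_eq_false, if_false, chainFrom]
      rw [loopA_iff]
      simp
    · simp only [List.length_cons, hcast, chainFrom, ne_eq, hw0, not_false_eq_true, if_true]
      constructor
      · intro hfalse; exact absurd hfalse (by simp)
      · intro hchain
        exact absurd (List.cons_eq_cons.mp hchain).1 hw0

-- B's return value ↔ "win counts distinct and in [0, k)"
theorem B_eq (graph : List (List Int)) (rank : List Int) (prop : List Int) (criteria : Int) :
    (findRank_alt graph rank prop criteria = true) ↔
    ((pvWins graph prop criteria).Nodup ∧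
      ∀ w ∈ pvWins graph prop criteria, 0 ≤ w ∧ w < ((pvIdx graph prop criteria).length : Int)) := by
  have h : findRank_alt graph rank prop criteria =
      (if ((PySem.Set.ofList (pvWins graph prop criteria)).length : Int)
            != ((pvIdx graph prop criteria).length : Int)
          || (pvWins graph prop criteria).any
              (fun w => decide (w < 0) || decide (w ≥ ((pvIdx graph prop criteria).length : Int)))
       then false else true) := rfl
  rw [h]
  have hlenw : (pvWins graph prop criteria).length = (pvIdx graph prop criteria).length := by
    simp [pvWins]
  split_ifs with hc
  · simp only [false_iff, not_and]
    intro hnd hbd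
    have hofl : (PySem.Set.ofList (pvWins graph prop criteria)).length
        = (pvWins graph prop criteria).length := (ofList_length_iff _).2 hnd
    simp only [Bool.or_eq_true, bne_iff_ne, ne_eq, List.any_eq_true, decide_eq_true_eq] at hc
    rcases hc with hc | ⟨w, hw, hcw⟩
    · apply hc
      rw [hofl, hlenw]
    · rcases hbd w hw with ⟨h0, hk⟩
      omega
  · simp only [Bool.or_eq_true, bne_iff_ne, ne_eq, List.any_eq_true, decide_eq_true_eq] at hc
    push Not at hc
    obtain ⟨hlen, hany⟩ := hc
    have hnodup : (pvWins graph prop criteria).Nodup := by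
      apply (ofList_length_iff _).1
      rw [hlenw]
      exact_mod_cast hlen
    simp only [true_iff]
    exact ⟨hnodup, fun w hw => by have := hany w hw; omega⟩

-- sorted-desc-equals-chain ↔ nodup-and-bounded, for any pair list
theorem chain_iff (data : List (Int × Int)) :
    ((PySem.List.sorted data (fun x => -x.1) false).map Prod.fst
        = chainFrom (data.length : Int) data.length)
    ↔ ((data.map Prod.fst).Nodup ∧
        ∀ w ∈ data.map Prod.fst, 0 ≤ w ∧ w < (data.length : Int)) := by
  have hperm : (PySem.List.sorted data (fun x => -x.1) false).Perm data :=
    PySem.List.sorted_perm data (fun x => -x.1) false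
  have hfp : ((PySem.List.sorted data (fun x => -x.1) false).map Prod.fst).Perm
      (data.map Prod.fst) := hperm.map _
  have hlen : ((PySem.List.sorted data (fun x => -x.1) false).map Prod.fst).length
      = data.length := by
    rw [List.length_map, PySem.List.length_sorted]
  constructor
  · intro h
    have hpc : (data.map Prod.fst).Perm (chainFrom (data.length : Int) data.length) :=
      hfp.symm.trans (h ▸ List.Perm.refl _)
    refine ⟨?_, ?_⟩
    · have hch : (chainFrom (data.length : Int) data.length).Nodup :=
        (pairwise_gt_chainFrom _ _).imp (fun hgt => ne_of_gt hgt)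
      exact hpc.nodup_iff.2 hch
    · intro w hw
      have hwch := hpc.subset hw
      have := (mem_chainFrom _ _ _).1 hwch
      omega
  · rintro ⟨hnd, hbd⟩
    have hndF : ((PySem.List.sorted data (fun x => -x.1) false).map Prod.fst).Nodup :=
      hfp.nodup_iff.2 hnd
    have hbF : ∀ w ∈ (PySem.List.sorted data (fun x => -x.1) false).map Prod.fst,
        0 ≤ w ∧ w < (data.length : Int) := fun w hw => hbd w (hfp.subset hw)
    have hge : ((PySem.List.sorted data (fun x => -x.1) false).map Prod.fst).Pairwise
        (fun a b => b ≤ a) := by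
      have hs := PySem.List.sorted_pairwise data (fun x => -x.1)
      exact List.pairwise_map.mpr (hs.imp (fun hab => by omega))
    have hgt : ((PySem.List.sorted data (fun x => -x.1) false).map Prod.fst).Pairwise
        (· > ·) := by
      have hand := List.Pairwise.and hge hndF
      exact hand.imp (fun hab => lt_of_le_of_ne hab.1 (Ne.symm hab.2))
    have hchain := sd_chain _ hgt (by rw [hlen]; exact hbF)
    rw [hlen] at hchain
    exact hchain

theorem findRank_eq_alt (graph : List (List Int)) (rank : List Int) (prop : List Int)
    (criteria : Int) : findRank graph rank prop criteria = findRank_alt graph rank prop criteria := by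
  have hbr := chain_iff ((pvIdx graph prop criteria).map (fun i => (pvW graph prop criteria i, i)))
  rw [List.length_map] at hbr
  have hfst : ((pvIdx graph prop criteria).map (fun i => (pvW graph prop criteria i, i))).map Prod.fst
      = pvWins graph prop criteria := by
    rw [List.map_map]; rfl
  rw [hfst] at hbr
  have hiff : (findRank graph rank prop criteria = true) ↔ (findRank_alt graph rank prop criteria = true) :=
    (A_eq graph rank prop criteria).trans (hbr.trans (B_eq graph rank prop criteria).symm)
  cases hA' : findRank graph rank prop criteria <;>
    cases hB' : findRank_alt graph rank prop criteria <;> simp_all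

-- ===== VERDICT (by name: the statement is the Claim_ definition above) =====
theorem findRank_spec : Claim_equal_findRank := by
  intro graph rank prop criteria _ _
  unfold Spec_findRank
  exact findRank_eq_alt graph rank prop criteria
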